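-- pv_equiv track=rewrite | github.com/Anilrajbm/RegextoDfa | regextodfa.py | create_token_queue
-- ===== SOURCE A (Python) =====
-- def create_token_queue(input):
--     tokens = []
--     id = ''
--     for c in input:
--         if c in ['(', ')', '.', '*', '+']:
--             if id != '':
--                 tokens.append(id)
--                 id = ''
--             tokens.append(c)
--         else:
--             id = id + c
--     if id != '':
--         tokens.append(id)
--     return tokens
-- ===== SOURCE B (Python) =====
-- def create_token_queue(input):
--     specials = '().*+'
--     tokens = []
--     i = 0
--     n = len(input)
--     while i < n:
--         c = input[i]
--         if c in specials:
--             tokens.append(c)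
--             i += 1
--         else:
--             j = i + 1
--             while j < n and input[j] not in specials:
--                 j += 1
--             tokens.append(input[i:j])
--             i = j
--     return tokens
-- ===== Notes on version B (the rewrite author's own statement) =====
-- stated objective: alternative
-- what changed: B replaces A's pending-identifier accumulator with end-of-input flush by a direct scanner: it emits each special character immediately and extracts each maximal run of non-special characters with an inner scan plus one slice, so no accumulator or flush logic exists.
import Mathlib
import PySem

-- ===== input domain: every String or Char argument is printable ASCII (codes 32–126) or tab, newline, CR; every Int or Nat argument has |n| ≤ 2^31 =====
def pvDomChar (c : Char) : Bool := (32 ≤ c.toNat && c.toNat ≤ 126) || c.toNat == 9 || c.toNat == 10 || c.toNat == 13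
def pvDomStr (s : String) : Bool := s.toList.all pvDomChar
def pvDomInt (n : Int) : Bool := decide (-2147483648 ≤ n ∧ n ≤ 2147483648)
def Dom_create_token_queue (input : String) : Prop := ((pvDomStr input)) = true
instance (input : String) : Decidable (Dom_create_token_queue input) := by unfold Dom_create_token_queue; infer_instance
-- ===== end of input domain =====

-- B tokenizes by emitting specials directly and scanning maximal non-special runs,
-- replacing A's pending-accumulator-with-flush loop (alternative decomposition, same cost).


-- ===== PORT A =====
-- the for-loop over the characters, state = (tokens, id)
def ctqStepA (st : List String × String) (c : Char) : List String × String :=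
  if c = '(' ∨ c = ')' ∨ c = '.' ∨ c = '*' ∨ c = '+' then
    ((if st.2 ≠ "" then st.1 ++ [st.2] else st.1) ++ [String.ofList [c]], "")
  else
    (st.1, st.2.push c)

def create_token_queue (input : String) : List String :=
  let r := input.toList.foldl ctqStepA ([], "")
  if r.2 ≠ "" then r.1 ++ [r.2] else r.1

-- ===== PORT B =====
-- 'c in specials' of Source B
def ctqSpecial (c : Char) : Bool := c = '(' || c = ')' || c = '.' || c = '*' || c = '+'

-- Source B's outer while-loop; the inner while-loop advancing j over the maximal
-- non-special run is the takeWhile/dropWhile pair (exact: same characters scanned)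
def ctqScan : List Char → List String
  | [] => []
  | c :: cs =>
    if ctqSpecial c then
      String.ofList [c] :: ctqScan cs
    else
      String.ofList (c :: cs.takeWhile (fun x => !ctqSpecial x)) ::
        ctqScan (cs.dropWhile (fun x => !ctqSpecial x))
termination_by l => l.length
decreasing_by
  all_goals simp
  exact List.length_dropWhile_le _ _

def create_token_queue_alt (input : String) : List String := ctqScan input.toList

-- ===== PRECONDITION & SPEC =====
def Spec_create_token_queue (input : String) (out : List String) : Prop := out = create_token_queue_alt input
instance (input : String) (out : List String) : Decidable (Spec_create_token_queue input out) := by unfold Spec_create_token_queue; infer_instance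

-- ===== CLAIM (what is proved, stated in full; the proofs are below) =====
def Claim_equal_create_token_queue : Prop := ∀ (input : String), Dom_create_token_queue input → Spec_create_token_queue input (create_token_queue input)

-- ===== LEMMAS AND PROOFS =====

theorem ctqScan_nil : ctqScan [] = [] := by rw [ctqScan.eq_def]

theorem ctqScan_cons_sp (c : Char) (cs : List Char) (h : ctqSpecial c = true) :
    ctqScan (c :: cs) = String.ofList [c] :: ctqScan cs := by
  rw [ctqScan.eq_def]; simp [h]

theorem ctqScan_cons_ns (c : Char) (cs : List Char) (h : ctqSpecial c = false) :
    ctqScan (c :: cs) =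
      String.ofList (c :: cs.takeWhile (fun x => !ctqSpecial x)) ::
        ctqScan (cs.dropWhile (fun x => !ctqSpecial x)) := by
  rw [ctqScan.eq_def]; simp [h]

theorem ctqScan_all_nonspecial (l : List Char) (hl : l ≠ []) (h : ∀ c ∈ l, ctqSpecial c = false) :
    ctqScan l = [String.ofList l] := by
  cases l with
  | nil => exact absurd rfl hl
  | cons c cs =>
    rw [ctqScan_cons_ns c cs (h c (by simp)),
      List.takeWhile_eq_self_iff.mpr (by intro x hx; simp [h x (by simp [hx])]),
      List.dropWhile_eq_nil_iff.mpr (by intro x hx; simp [h x (by simp [hx])]),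
      ctqScan_nil]

-- the main invariant: the A-loop run from state (tokens, id) appends the tokens of id's
-- characters followed by the rest, provided id consists of non-special characters.
theorem ctq_loop_eq (cs : List Char) : ∀ (tokens : List String) (id : String),
    (∀ c ∈ id.toList, ctqSpecial c = false) →
    (let r := cs.foldl ctqStepA (tokens, id)
     if r.2 ≠ "" then r.1 ++ [r.2] else r.1) = tokens ++ ctqScan (id.toList ++ cs) := by
  induction cs with
  | nil =>
    intro tokens id hid
    simp only [List.foldl_nil, List.append_nil]
    by_cases h : id = ""
    · subst h; simp [ctqScan_nil]
    · have hne : id.toList ≠ [] := fun hnil => h (String.toList_eq_nil_iff.mp hnil)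
      rw [if_pos (by simpa using h), ctqScan_all_nonspecial _ hne hid, String.ofList_toList]
  | cons c cs ih =>
    intro tokens id hid
    simp only [List.foldl_cons]
    by_cases hc : c = '(' ∨ c = ')' ∨ c = '.' ∨ c = '*' ∨ c = '+'
    · rw [show ctqStepA (tokens, id) c =
          ((if id ≠ "" then tokens ++ [id] else tokens) ++ [String.ofList [c]], "") by
        simp [ctqStepA, hc]]
      rw [ih _ "" (by intro x hx; simp at hx)]
      have hcs : ctqSpecial c = true := by
        rcases hc with h|h|h|h|h <;> simp [ctqSpecial, h]
      by_cases h : id = ""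
      · subst h
        rw [show ("".toList : List Char) = [] from String.toList_empty, List.nil_append,
          List.nil_append, ctqScan_cons_sp c cs hcs]
        simp
      · have hne : id.toList ≠ [] := fun hnil => h (String.toList_eq_nil_iff.mp hnil)
        rw [if_pos (by simpa using h)]
        obtain ⟨d, ds, hds⟩ := List.exists_cons_of_ne_nil hne
        have hd : ctqSpecial d = false := hid d (by rw [hds]; simp)
        rw [hds, List.cons_append, ctqScan_cons_ns d _ hd]
        have hdsall : ∀ x ∈ ds, ctqSpecial x = false :=
          fun x hx => hid x (by rw [hds]; simp [hx])
        have htkds : ds.takeWhile (fun x => !ctqSpecial x) = ds :=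
          List.takeWhile_eq_self_iff.mpr (by intro x hx; simp [hdsall x hx])
        have hdpds : ds.dropWhile (fun x => !ctqSpecial x) = [] :=
          List.dropWhile_eq_nil_iff.mpr (by intro x hx; simp [hdsall x hx])
        have htk : (ds ++ c :: cs).takeWhile (fun x => !ctqSpecial x) = ds := by
          rw [List.takeWhile_append]
          split
          · rw [List.takeWhile_cons_of_neg (by simp [hcs]), List.append_nil]
          · rename_i hall; rw [htkds] at hall; simp at hall
        have hdp : (ds ++ c :: cs).dropWhile (fun x => !ctqSpecial x) = c :: cs := by
          rw [List.dropWhile_append]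
          split
          · rw [List.dropWhile_cons_of_neg (by simp [hcs])]
          · rename_i hall; rw [hdpds] at hall; simp at hall
        rw [htk, hdp, ctqScan_cons_sp c cs hcs, ← hds, String.ofList_toList]
        simp
    · have hcs : ctqSpecial c = false := by
        simp only [ctqSpecial]
        push Not at hc
        simp [hc.1, hc.2.1, hc.2.2.1, hc.2.2.2.1, hc.2.2.2.2]
      rw [show ctqStepA (tokens, id) c = (tokens, id.push c) by simp [ctqStepA, hc]]
      rw [ih _ (id.push c) (by
        intro x hx
        rw [String.toList_push] at hx
        rcases List.mem_append.mp hx with h | h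
        · exact hid x h
        · simp at h; subst h; exact hcs)]
      rw [String.toList_push]
      simp

-- ===== VERDICT (by name: the statement is the Claim_ definition above) =====
theorem create_token_queue_spec : Claim_equal_create_token_queue := by
  intro input _
  show create_token_queue input = create_token_queue_alt input
  unfold create_token_queue create_token_queue_alt
  simpa using ctq_loop_eq input.toList [] "" (by intro x hx; simp at hx)
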